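-- pv_equiv track=rewrite | github.com/Jerempire/ancient-drug-discovery | v4/pepmlm/sar_grid.py | build_peptide
-- ===== SOURCE A (Python) =====
-- def build_peptide(scaffold_body, p1, target_length):
--     """Build a peptide: P1 + scaffold_body, truncated or padded to target_length."""
--     full = p1 + scaffold_body
--     if len(full) >= target_length:
--         return full[:target_length]
--     else:
--         # Extend with the scaffold pattern (repeat last few residues)
--         while len(full) < target_length:
--             full += scaffold_body[len(full) % len(scaffold_body)]
--         return full[:target_length]
-- ===== SOURCE B (Python) =====
-- def build_peptide(scaffold_body, p1, target_length):
--     """Build a peptide: P1 + scaffold_body, truncated or padded to target_length."""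
--     full = p1 + scaffold_body
--     if len(full) >= target_length:
--         return full[:target_length]
--     n = len(scaffold_body)
--     start = len(full) % n
--     rot = scaffold_body[start:] + scaffold_body[:start]
--     pad_len = target_length - len(full)
--     return full + (rot * (pad_len // n + 1))[:pad_len]
-- ===== Notes on version B (the rewrite author's own statement) =====
-- stated objective: faster
-- what changed: Replaces A's one-character-per-iteration while loop with a closed-form pad: rotate the scaffold by len(full) % n, replicate it enough times and slice off pad_len characters.
import Mathlib
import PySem

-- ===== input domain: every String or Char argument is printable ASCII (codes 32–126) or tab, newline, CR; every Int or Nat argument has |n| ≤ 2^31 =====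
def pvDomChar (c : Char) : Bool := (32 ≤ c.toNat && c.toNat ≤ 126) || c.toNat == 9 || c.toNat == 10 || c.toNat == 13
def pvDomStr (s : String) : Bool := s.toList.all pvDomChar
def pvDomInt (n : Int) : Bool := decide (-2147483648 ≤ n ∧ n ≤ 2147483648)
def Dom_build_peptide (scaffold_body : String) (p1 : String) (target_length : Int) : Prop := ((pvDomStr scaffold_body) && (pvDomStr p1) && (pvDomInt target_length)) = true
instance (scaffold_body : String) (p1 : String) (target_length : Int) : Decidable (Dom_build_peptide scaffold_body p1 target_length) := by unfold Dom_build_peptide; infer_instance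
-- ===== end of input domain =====

-- B replaces A's one-character-at-a-time padding loop with a closed-form pad
-- (rotate the scaffold, replicate, slice); equivalence proved on Pre_ (where A returns).

-- ===== PORT A =====
-- A's while loop: append scaffold[len(full) % len(scaffold)] until len(full) ≥ target.
-- The 'scaffold ≠ []' guard is only for totality (Python raises ZeroDivisionError there;
-- excluded by Pre_). Index is 0 ≤ len % n < n, so Python's s[i] is exactly getD here.
def padA (scaffold : List Char) (target : Int) (full : List Char) : List Char :=
  if _h : (full.length : Int) < target ∧ scaffold ≠ [] then
    padA scaffold target (full ++ [scaffold.getD (full.length % scaffold.length) ' '])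
  else full
termination_by (target - full.length).toNat
decreasing_by simp; omega

def build_peptide (scaffold_body : String) (p1 : String) (target_length : Int) : String :=
  let full := p1.toList ++ scaffold_body.toList
  if (full.length : Int) ≥ target_length then
    String.ofList (PySem.List.slice full none (some target_length))
  else
    String.ofList (PySem.List.slice (padA scaffold_body.toList target_length full) none (some target_length))

-- ===== PORT B =====
-- Python's len(full) % n with both operands nonnegative is exactly Nat mod.
-- 'rot * reps' = flatten (replicate reps rot). 'hn' guard is totality only
-- (Python raises ZeroDivisionError there; excluded by Pre_).
def build_peptide_alt (scaffold_body : String) (p1 : String) (target_length : Int) : String :=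
  let full := p1.toList ++ scaffold_body.toList
  if (full.length : Int) ≥ target_length then
    String.ofList (PySem.List.slice full none (some target_length))
  else
    let n := scaffold_body.toList.length
    if _hn : n = 0 then String.ofList full
    else
      let start : Nat := full.length % n
      let rot := PySem.List.slice scaffold_body.toList (some (start : Int)) none ++
                 PySem.List.slice scaffold_body.toList none (some (start : Int))
      let padLen : Int := target_length - full.length
      let reps : Nat := (PySem.Int.floordiv padLen (n : Int) + 1).toNat
      String.ofList (full ++ PySem.List.slice ((List.replicate reps rot).flatten) none (some padLen))

-- ===== PRECONDITION & SPEC =====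
-- Pre_ excludes exactly the inputs where Python A raises ZeroDivisionError:
-- empty scaffold_body while padding is needed (p1+scaffold shorter than target).
def Pre_build_peptide (scaffold_body : String) (p1 : String) (target_length : Int) : Prop :=
  scaffold_body ≠ "" ∨ target_length ≤ ((p1.toList.length + scaffold_body.toList.length : Nat) : Int)
instance (scaffold_body : String) (p1 : String) (target_length : Int) : Decidable (Pre_build_peptide scaffold_body p1 target_length) := by unfold Pre_build_peptide; infer_instance

def pvWitness_build_peptide : String × String × Int := ("ABC", "xy", 9)

def Spec_build_peptide (scaffold_body : String) (p1 : String) (target_length : Int) (out : String) : Prop := out = build_peptide_alt scaffold_body p1 target_length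
instance (scaffold_body : String) (p1 : String) (target_length : Int) (out : String) : Decidable (Spec_build_peptide scaffold_body p1 target_length out) := by unfold Spec_build_peptide; infer_instance

-- ===== CLAIM (what is proved, stated in full; the proofs are below) =====
def Claim_equal_build_peptide : Prop := ∀ (scaffold_body : String) (p1 : String) (target_length : Int), Dom_build_peptide scaffold_body p1 target_length → Pre_build_peptide scaffold_body p1 target_length → Spec_build_peptide scaffold_body p1 target_length (build_peptide scaffold_body p1 target_length)

-- ===== LEMMAS AND PROOFS =====

-- A's loop appends, character by character, the cyclic scaffold pattern read from offset full.length.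
lemma padA_eq (scaffold : List Char) (hs : scaffold ≠ []) (target : Int) :
    ∀ (k : Nat) (full : List Char), (target - full.length).toNat = k →
    padA scaffold target full =
      full ++ (List.range k).map (fun i => scaffold.getD ((full.length + i) % scaffold.length) ' ') := by
  intro k
  induction k with
  | zero =>
    intro full hk
    rw [padA]
    have : ¬ ((full.length : Int) < target ∧ scaffold ≠ []) := by
      rintro ⟨h1, _⟩; omega
    simp [this]
  | succ k ih =>
    intro full hk
    have hlt : (full.length : Int) < target := by omega
    rw [padA, dif_pos ⟨hlt, hs⟩,
        ih (full ++ [scaffold.getD (full.length % scaffold.length) ' ']) (by simp; omega)]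
    simp only [List.append_assoc, List.length_append, List.length_singleton]
    have hfun : ∀ i ∈ List.range k,
        scaffold.getD ((full.length + 1 + i) % scaffold.length) ' '
          = scaffold.getD ((full.length + (i + 1)) % scaffold.length) ' ' := by
      intro i _
      rw [show full.length + 1 + i = full.length + (i + 1) from by omega]
    rw [List.map_congr_left hfun, List.range_succ_eq_map]
    simp only [List.map_cons, List.map_map, List.singleton_append]
    simp [Function.comp_def]

-- taking m ≤ reps·|rot| characters of rot repeated reps times reads rot cyclically
lemma take_flatten_replicate (rot : List Char) (hrot : rot ≠ []) :
    ∀ (reps m : Nat), m ≤ reps * rot.length →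
    ((List.replicate reps rot).flatten.take m) =
      (List.range m).map (fun j => rot.getD (j % rot.length) ' ') := by
  intro reps
  induction reps with
  | zero =>
    intro m hm
    simp at hm
    simp [hm]
  | succ r ih =>
    intro m hm
    rw [List.replicate_succ, List.flatten_cons]
    by_cases hmn : m ≤ rot.length
    · rw [List.take_append_of_le_length hmn]
      apply List.ext_getElem
      · simp [hmn]
      · intro i h1 h2
        have hi : i < rot.length := by simp at h1; omega
        simp [Nat.mod_eq_of_lt hi, List.getD_eq_getElem?_getD, List.getElem?_eq_getElem hi]
    · have hn0 : 0 < rot.length := List.length_pos_of_ne_nil hrot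
      have hmul : (r + 1) * rot.length = r * rot.length + rot.length := Nat.succ_mul r rot.length
      rw [List.take_append, List.take_of_length_le (by omega),
          ih (m - rot.length) (by omega)]
      rw [show List.range m = List.range rot.length ++ (List.range (m - rot.length)).map (rot.length + ·) from
            by rw [← List.range_add]; congr 1; omega]
      rw [List.map_append, List.map_map]
      congr 1
      · apply List.ext_getElem
        · simp
        · intro i h1 h2
          have hi : i < rot.length := by simpa using h2
          simp [Nat.mod_eq_of_lt hi, List.getD_eq_getElem?_getD, List.getElem?_eq_getElem hi]
      · apply List.map_congr_left
        intro i _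
        simp only [Function.comp_apply, Nat.add_mod_left]

-- reading the rotated scaffold at j % n is reading the scaffold cyclically at (s + j) % n
lemma rot_getD (scaffold : List Char) (hs : scaffold ≠ []) (s : Nat) (hlt : s < scaffold.length) (j : Nat) :
    (scaffold.drop s ++ scaffold.take s).getD (j % scaffold.length) ' ' =
      scaffold.getD ((s + j) % scaffold.length) ' ' := by
  have hn0 : 0 < scaffold.length := List.length_pos_of_ne_nil hs
  have hj : j % scaffold.length < scaffold.length := Nat.mod_lt _ hn0
  by_cases hc : j % scaffold.length < scaffold.length - s
  · rw [List.getD_append _ _ _ _ (by simp; omega)]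
    rw [List.getD_eq_getElem?_getD, List.getElem?_drop, ← List.getD_eq_getElem?_getD]
    have h1 : (s + j) % scaffold.length = s + j % scaffold.length := by
      rw [Nat.add_mod, Nat.mod_eq_of_lt hlt, Nat.mod_eq_of_lt (by omega)]
    rw [h1]
  · rw [List.getD_append_right _ _ _ _ (by simp; omega)]
    simp only [List.length_drop]
    have h2 : (s + j) % scaffold.length = j % scaffold.length - (scaffold.length - s) := by
      rw [Nat.add_mod, Nat.mod_eq_of_lt hlt]
      have hge : scaffold.length ≤ s + j % scaffold.length := by omega
      rw [Nat.mod_eq_sub_mod hge, Nat.mod_eq_of_lt (by omega)]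
      omega
    rw [List.getD_eq_getElem?_getD, List.getElem?_take_of_lt (by omega), ← List.getD_eq_getElem?_getD, h2]

-- ===== VERDICT (by name: the statement is the Claim_ definition above) =====
theorem build_peptide_spec : Claim_equal_build_peptide := by
  intro sb p1 t _hdom hpre
  unfold Spec_build_peptide build_peptide build_peptide_alt
  set full := p1.toList ++ sb.toList with hfull
  by_cases hge : (full.length : Int) ≥ t
  · simp [hge]
  · simp only [hge, if_false]
    have hs : sb.toList ≠ [] := by
      rcases hpre with h | h
      · intro hnil
        apply h
        have : sb = String.ofList sb.toList := by simp
        rw [this, hnil]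
      · exfalso; simp [hfull] at hge; simp at h; omega
    set n := sb.toList.length with hnn
    have hn0 : 0 < n := List.length_pos_of_ne_nil hs
    have hn : ¬ (n = 0) := by omega
    simp only [hn, dif_neg, not_false_iff]
    set L := full.length with hL
    have hLt : (L : Int) < t := by omega
    set m : Nat := (t - L).toNat with hm
    set s : Nat := L % n with hsdef
    have hslt : s < n := Nat.mod_lt _ hn0
    -- A side: slice [:t] of padA = full ++ cyclic pattern of length m
    rw [padA_eq sb.toList hs t m full rfl]
    have htnat : t.toNat = L + m := by omega
    simp only [PySem.List.slice_to _ (show (0:Int) ≤ t by omega)]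
    rw [htnat, List.take_append, show L + m - full.length = m from by omega,
        List.take_of_length_le
          (by simp : (List.map (fun i => sb.toList.getD ((full.length + i) % sb.toList.length) ' ')
            (List.range m)).length ≤ m),
        List.take_of_length_le (show full.length ≤ L + m by omega)]
    -- B side: rewrite the slices
    simp only [PySem.List.slice_from_natCast, PySem.List.slice_to_natCast]
    set rot := sb.toList.drop s ++ sb.toList.take s with hrot
    have hnlen : sb.toList.length = sb.length := by simp
    have hrotlen : rot.length = n := by simp [hrot]; omega
    have hrotne : rot ≠ [] := by intro h; rw [h] at hrotlen; simp at hrotlen; omega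
    set padLen : Int := t - (L : Int) with hpl
    have hpl0 : 0 < padLen := by omega
    simp only [PySem.List.slice_to _ (show (0:Int) ≤ padLen by omega)]
    have hplnat : padLen.toNat = m := by omega
    rw [hplnat]
    -- bound m ≤ reps * n
    set q : Int := PySem.Int.floordiv padLen (n : Int) with hq
    have hq' : q * n + PySem.Int.mod padLen n = padLen := PySem.Int.floordiv_mul_add_mod padLen n
    have hmodlt : PySem.Int.mod padLen n < n := PySem.Int.mod_lt padLen (by exact_mod_cast hn0)
    have hmodge : 0 ≤ PySem.Int.mod padLen n := PySem.Int.mod_nonneg padLen (by exact_mod_cast hn0)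
    have hq0 : 0 ≤ q := by nlinarith
    have hbound : m ≤ (q + 1).toNat * n := by
      zify
      rw [Int.toNat_of_nonneg (by omega : (0:Int) ≤ q + 1)]
      have hexp : (q + 1) * (n : Int) = q * n + n := by ring
      have hmi : (m : Int) = padLen := by omega
      linarith
    rw [take_flatten_replicate rot hrotne _ m (by rw [hrotlen]; exact hbound)]
    -- compare the two cyclic patterns elementwise
    congr 1
    congr 1
    apply List.map_congr_left
    intro j _
    rw [hrot, show (sb.toList.drop s ++ sb.toList.take s).length = sb.toList.length from by
          simp; omega]
    rw [rot_getD sb.toList hs s hslt j]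
    congr 1
    simp only [hsdef]
    rw [Nat.mod_add_mod, hL]
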